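-- pv_equiv track=rewrite | github.com/alinakonysheva/algorithms_python | HW_04/Task1.py | search_max_negative_3
-- ===== SOURCE A (Python) =====
-- def search_max_negative_3(list_init):
--     array_negative = []
--     for i in list_init:
--         if i < 0:
--             array_negative.append(i)
--     max_negative = max(array_negative)
--     index_max_negative = list(i for i, e in enumerate(list_init) if e == max_negative)[0]
--
--     return max_negative, index_max_negative
-- ===== SOURCE B (Python) =====
-- def search_max_negative_3(list_init):
--     best_value = None
--     best_index = None
--     for i, x in enumerate(list_init):
--         if x >= 0:
--             continue
--         if best_value is None or x > best_value:
--             best_value = x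
--             best_index = i
--     if best_value is None:
--         raise ValueError("no negative values")
--     return best_value, best_index
-- ===== Notes on version B (the rewrite author's own statement) =====
-- stated objective: faster
-- what changed: Replaced A's three passes (build a negatives list, max() over it, a second enumerate scan for the index) by one pass over enumerate that tracks the best negative value and its first index (strict '>' keeps the first occurrence on ties); no intermediate list and no second scan.
import Mathlib
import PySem

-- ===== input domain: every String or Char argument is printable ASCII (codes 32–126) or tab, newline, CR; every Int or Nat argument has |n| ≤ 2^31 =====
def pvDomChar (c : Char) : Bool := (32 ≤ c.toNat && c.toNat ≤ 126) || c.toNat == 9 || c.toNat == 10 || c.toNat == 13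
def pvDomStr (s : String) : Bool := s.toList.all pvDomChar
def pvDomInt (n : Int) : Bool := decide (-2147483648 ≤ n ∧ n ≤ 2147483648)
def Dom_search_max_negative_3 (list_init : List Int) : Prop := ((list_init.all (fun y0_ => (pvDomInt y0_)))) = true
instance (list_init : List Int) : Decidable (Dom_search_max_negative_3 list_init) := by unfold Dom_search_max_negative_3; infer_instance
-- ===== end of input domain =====

-- B replaces A's three passes (filter, max(), index scan) by one pass keeping the best negative and its first index (measured faster in a timing run).

-- ===== PORT A =====
def search_max_negative_3 (list_init : List Int) : Int × Int :=
  let array_negative := list_init.foldl (fun acc i => if i < 0 then acc ++ [i] else acc) []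
  match PySem.List.max? array_negative (fun x => x) with
  | none => (0, 0)  -- Python: max([]) raises ValueError; excluded by Pre_
  | some max_negative =>
    match PySem.List.pyGet?
        (((PySem.List.enumerate list_init).filter (fun p => p.2 == max_negative)).map (fun p => p.1)) 0 with
    | none => (0, 0)  -- unreachable: max_negative occurs in list_init
    | some index_max_negative => (max_negative, index_max_negative)

-- ===== PORT B =====
-- the single-pass loop of Source B: state = Option (best_value, best_index)
def smn3Loop : List (Int × Int) → Option (Int × Int) → Option (Int × Int)
  | [], st => st
  | (i, x) :: rest, st =>
    if x ≥ 0 then smn3Loop rest st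
    else
      match st with
      | none => smn3Loop rest (some (x, i))
      | some (bv, bi) =>
        if x > bv then smn3Loop rest (some (x, i)) else smn3Loop rest (some (bv, bi))

def search_max_negative_3_alt (list_init : List Int) : Int × Int :=
  match smn3Loop (PySem.List.enumerate list_init) none with
  | none => (0, 0)  -- Python B raises ValueError; excluded by Pre_
  | some (v, i) => (v, i)

-- ===== PRECONDITION & SPEC =====
-- Pre_ excludes exactly the inputs with no negative element, on which Python A raises ValueError (max of empty sequence).
def Pre_search_max_negative_3 (list_init : List Int) : Prop := ∃ x ∈ list_init, x < 0
instance (list_init : List Int) : Decidable (Pre_search_max_negative_3 list_init) := by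
  unfold Pre_search_max_negative_3; infer_instance
def pvWitness_search_max_negative_3 : List Int := [3, -7, -2, -7]

def Spec_search_max_negative_3 (list_init : List Int) (out : Int × Int) : Prop := out = search_max_negative_3_alt list_init
instance (list_init : List Int) (out : Int × Int) : Decidable (Spec_search_max_negative_3 list_init out) := by unfold Spec_search_max_negative_3; infer_instance

-- ===== CLAIM (what is proved, stated in full; the proofs are below) =====
def Claim_equal_search_max_negative_3 : Prop := ∀ (list_init : List Int), Dom_search_max_negative_3 list_init → Pre_search_max_negative_3 list_init → Spec_search_max_negative_3 list_init (search_max_negative_3 list_init)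

-- ===== LEMMAS AND PROOFS =====

-- reference recursion (proof-only): max negative with its first (relative) index
def smn3Res : List Int → Option (Int × Nat)
  | [] => none
  | x :: xs =>
    match smn3Res xs with
    | none => if x < 0 then some (x, 0) else none
    | some (v, k) => if x < 0 ∧ v ≤ x then some (x, 0) else some (v, k + 1)

theorem smn3Res_neg : ∀ (l : List Int) (v : Int) (k : Nat), smn3Res l = some (v, k) → v < 0 := by
  intro l
  induction l with
  | nil => intro v k h; simp [smn3Res] at h
  | cons x xs ih =>
    intro v k h
    rcases hx : smn3Res xs with _ | ⟨w, j⟩ <;> simp only [smn3Res, hx] at h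
    · by_cases hc : x < 0
      · rw [if_pos hc] at h; simp only [Option.some.injEq, Prod.mk.injEq] at h; omega
      · rw [if_neg hc] at h; simp at h
    · have hw := ih w j hx
      by_cases hc : x < 0 ∧ w ≤ x <;>
        [rw [if_pos hc] at h; rw [if_neg hc] at h] <;>
        simp only [Option.some.injEq, Prod.mk.injEq] at h <;> omega

theorem smn3Res_none : ∀ (l : List Int), smn3Res l = none → ∀ y ∈ l, ¬ y < 0 := by
  intro l
  induction l with
  | nil => simp
  | cons x xs ih =>
    intro h y hy
    rcases List.mem_cons.mp hy with rfl | hy'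
    · rcases hx : smn3Res xs with _ | ⟨w, j⟩ <;> simp only [smn3Res, hx] at h
      · by_cases hc : y < 0
        · rw [if_pos hc] at h; simp at h
        · exact hc
      · by_cases hc : y < 0 ∧ w ≤ y <;> [rw [if_pos hc] at h; rw [if_neg hc] at h] <;> simp at h
    · rcases hx : smn3Res xs with _ | ⟨w, j⟩ <;> simp only [smn3Res, hx] at h
      · exact ih hx y hy'
      · by_cases hc : x < 0 ∧ w ≤ x <;> [rw [if_pos hc] at h; rw [if_neg hc] at h] <;> simp at h

theorem smn3Res_get : ∀ (l : List Int) (v : Int) (k : Nat), smn3Res l = some (v, k) → l[k]? = some v := by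
  intro l
  induction l with
  | nil => intro v k h; simp [smn3Res] at h
  | cons x xs ih =>
    intro v k h
    rcases hx : smn3Res xs with _ | ⟨w, j⟩ <;> simp only [smn3Res, hx] at h
    · by_cases hc : x < 0
      · rw [if_pos hc] at h
        simp only [Option.some.injEq, Prod.mk.injEq] at h
        obtain ⟨hv, hk⟩ := h; subst hv; subst hk; simp
      · rw [if_neg hc] at h; simp at h
    · by_cases hc : x < 0 ∧ w ≤ x
      · rw [if_pos hc] at h
        simp only [Option.some.injEq, Prod.mk.injEq] at h
        obtain ⟨hv, hk⟩ := h; subst hv; subst hk; simp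
      · rw [if_neg hc] at h
        simp only [Option.some.injEq, Prod.mk.injEq] at h
        obtain ⟨hv, hk⟩ := h; subst hv; subst hk
        simpa using ih w j hx

theorem smn3Res_max : ∀ (l : List Int) (v : Int) (k : Nat), smn3Res l = some (v, k) →
    ∀ y ∈ l, y < 0 → y ≤ v := by
  intro l
  induction l with
  | nil => simp
  | cons x xs ih =>
    intro v k h y hy hyneg
    rcases hx : smn3Res xs with _ | ⟨w, j⟩ <;> simp only [smn3Res, hx] at h
    · by_cases hc : x < 0
      · rw [if_pos hc] at h
        simp only [Option.some.injEq, Prod.mk.injEq] at h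
        obtain ⟨hv, _⟩ := h; subst hv
        rcases List.mem_cons.mp hy with rfl | hy'
        · omega
        · exact absurd hyneg (smn3Res_none xs hx y hy')
      · rw [if_neg hc] at h; simp at h
    · by_cases hc : x < 0 ∧ w ≤ x <;> [rw [if_pos hc] at h; rw [if_neg hc] at h] <;>
        simp only [Option.some.injEq, Prod.mk.injEq] at h <;> obtain ⟨hv, _⟩ := h <;> subst hv
      · rcases List.mem_cons.mp hy with rfl | hy'
        · omega
        · exact le_trans (ih w j hx y hy' hyneg) hc.2
      · rcases List.mem_cons.mp hy with rfl | hy'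
        · omega
        · exact ih w j hx y hy' hyneg

theorem smn3Res_first : ∀ (l : List Int) (v : Int) (k : Nat), smn3Res l = some (v, k) →
    ∀ j < k, l[j]? ≠ some v := by
  intro l
  induction l with
  | nil => intro v k h; simp [smn3Res] at h
  | cons x xs ih =>
    intro v k h j hj
    rcases hx : smn3Res xs with _ | ⟨w, j'⟩ <;> simp only [smn3Res, hx] at h
    · by_cases hc : x < 0
      · rw [if_pos hc] at h
        simp only [Option.some.injEq, Prod.mk.injEq] at h
        omega
      · rw [if_neg hc] at h; simp at h
    · by_cases hc : x < 0 ∧ w ≤ x <;> [rw [if_pos hc] at h; rw [if_neg hc] at h] <;>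
        simp only [Option.some.injEq, Prod.mk.injEq] at h <;>
        obtain ⟨hv, hk⟩ := h
      · omega
      · subst hv
        have hwneg := smn3Res_neg xs w j' hx
        cases j with
        | zero =>
          simp only [List.getElem?_cons_zero, ne_eq, Option.some.injEq]
          intro hxw; omega
        | succ j0 =>
          simp only [List.getElem?_cons_succ]
          exact ih w j' hx j0 (by omega)

-- B-loop with a nonempty accumulator, expressed through smn3Res
theorem smn3Loop_some : ∀ (l : List Int) (s bv bi : Int),
    smn3Loop (PySem.List.enumerate l s) (some (bv, bi)) =
      match smn3Res l with
      | none => some (bv, bi)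
      | some (v, k) => if v > bv then some (v, s + (k : Int)) else some (bv, bi) := by
  intro l
  induction l with
  | nil => intro s bv bi; simp [PySem.List.enumerate_nil, smn3Loop, smn3Res]
  | cons x xs ih =>
    intro s bv bi
    rw [PySem.List.enumerate_cons]
    rcases hx : smn3Res xs with _ | ⟨v, k⟩ <;>
      simp only [smn3Loop, smn3Res, ih, hx] <;>
      split_ifs <;>
      first
        | rfl
        | (exfalso; omega)
        | (simp only [Option.some.injEq, Prod.mk.injEq]; constructor <;> omega)
        | (simp only [Option.some.injEq, Prod.mk.injEq]; omega)
        | (try simp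
           all_goals try split_ifs
           all_goals try simp_all
           all_goals omega)

theorem smn3Loop_none : ∀ (l : List Int) (s : Int),
    smn3Loop (PySem.List.enumerate l s) none =
      (smn3Res l).map (fun p => (p.1, s + (p.2 : Int))) := by
  intro l
  induction l with
  | nil => intro s; simp [PySem.List.enumerate_nil, smn3Loop, smn3Res]
  | cons x xs ih =>
    intro s
    rw [PySem.List.enumerate_cons]
    rcases hx : smn3Res xs with _ | ⟨v, k⟩ <;>
      simp only [smn3Loop, smn3Res, ih, hx, smn3Loop_some, Option.map_some, Option.map_none] <;>
      split_ifs <;>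
      first
        | rfl
        | (exfalso; omega)
        | (simp only [Option.some.injEq, Prod.mk.injEq]; constructor <;> omega)
        | (simp only [Option.some.injEq, Prod.mk.injEq]; omega)
        | (try simp
           all_goals try split_ifs
           all_goals try simp_all
           all_goals omega)

-- A's foldl builds the filter of the negatives
theorem smn3_fold_filter : ∀ (l : List Int) (acc : List Int),
    l.foldl (fun acc i => if i < 0 then acc ++ [i] else acc) acc = acc ++ l.filter (fun i => i < 0) := by
  intro l
  induction l with
  | nil => simp
  | cons x xs ih =>
    intro acc
    simp only [List.foldl_cons, List.filter_cons]
    by_cases hx : x < 0 <;> simp [hx, ih]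

-- A's first-index scan, characterised by "value at k, not before k"
theorem smn3_first_index : ∀ (l : List Int) (s m : Int) (k : Nat),
    l[k]? = some m → (∀ j < k, l[j]? ≠ some m) →
    (((PySem.List.enumerate l s).filter (fun p => p.2 == m)).map (fun p => p.1))[0]? = some (s + (k : Int)) := by
  intro l
  induction l with
  | nil => intro s m k h; simp at h
  | cons x xs ih =>
    intro s m k hk hfirst
    rw [PySem.List.enumerate_cons]
    cases k with
    | zero =>
      simp only [List.getElem?_cons_zero, Option.some.injEq] at hk
      subst hk
      simp
    | succ k0 =>
      simp only [List.getElem?_cons_succ] at hk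
      have hx : x ≠ m := by
        have := hfirst 0 (Nat.succ_pos k0)
        simpa using this
      have hrest := ih (s + 1) m k0 hk (fun j hj => by
        have := hfirst (j + 1) (by omega)
        simpa using this)
      simp only [List.filter_cons]
      have : (x == m) = false := by simpa using hx
      simp only [this, Bool.false_eq_true, if_neg, ite_false]
      rw [hrest]; congr 1; push_cast; ring

-- ===== VERDICT (by name: the statement is the Claim_ definition above) =====
theorem search_max_negative_3_spec : Claim_equal_search_max_negative_3 := by
  intro l _ hpre
  unfold Spec_search_max_negative_3 search_max_negative_3 search_max_negative_3_alt
  obtain ⟨x0, hx0mem, hx0neg⟩ := hpre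
  -- smn3Res l is some
  rcases hres : smn3Res l with _ | ⟨v, k⟩
  · exact absurd hx0neg (smn3Res_none l hres x0 hx0mem)
  have hvneg := smn3Res_neg l v k hres
  have hvget := smn3Res_get l v k hres
  have hvmax := smn3Res_max l v k hres
  have hvfirst := smn3Res_first l v k hres
  -- B side
  rw [smn3Loop_none l 0, hres]
  -- A side
  rw [smn3_fold_filter l []]
  simp only [List.nil_append]
  rcases hmax : PySem.List.max? (l.filter (fun i => i < 0)) (fun x => x) with _ | m
  · rw [PySem.List.max?_eq_none_iff] at hmax
    have : v ∈ l.filter (fun i => i < 0) := by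
      rw [List.mem_filter]
      exact ⟨List.mem_of_getElem? hvget, by simpa using hvneg⟩
    simp [hmax] at this
  · -- m = v
    have hmmem := PySem.List.max?_mem hmax
    rw [List.mem_filter] at hmmem
    have hmax' := PySem.List.max?_isMax hmax
    have hmv : m = v := by
      have h1 : m ≤ v := hvmax m hmmem.1 (by simpa using hmmem.2)
      have h2 : v ≤ m := by
        refine hmax' v ?_
        rw [List.mem_filter]
        exact ⟨List.mem_of_getElem? hvget, by simpa using hvneg⟩
      omega
    subst hmv
    have hidx := smn3_first_index l 0 m k hvget (fun j hj => hvfirst j hj)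
    simp only [hmax]
    rw [PySem.List.pyGet?_zero, hidx]
    simp

theorem pvWitness_ok : Dom_search_max_negative_3 pvWitness_search_max_negative_3 ∧ Pre_search_max_negative_3 pvWitness_search_max_negative_3 := by decide
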